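-- pv_equiv track=rewrite | github.com/QBRC/PIPE-CLIP | lib/Mutation2.py | SBeforeFirstM
-- ===== SOURCE A (Python) =====
-- def SBeforeFirstM(ci):
-- 	for index in range(len(ci)):
-- 		if ci[index][0] == 0:
-- 			if index == 0:
-- 				return 0
-- 			else:
-- 				s = 0
-- 				for i in range(0,index):
-- 					if ci[i][0] == 4:
-- 						s += ci[i][1]
-- 				return s
-- ===== SOURCE B (Python) =====
-- def SBeforeFirstM(ci):
-- 	s = 0
-- 	for el in ci:
-- 		if el[0] == 0:
-- 			return s
-- 		elif el[0] == 4: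
-- 			s += el[1]
-- ===== Notes on version B (the rewrite author's own statement) =====
-- stated objective: simpler
-- what changed: Replaced A's locate-the-first-match-then-rescan-the-prefix structure with one accumulating pass that keeps the running soft-clip sum and returns it the moment the first match element is seen.
import Mathlib
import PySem

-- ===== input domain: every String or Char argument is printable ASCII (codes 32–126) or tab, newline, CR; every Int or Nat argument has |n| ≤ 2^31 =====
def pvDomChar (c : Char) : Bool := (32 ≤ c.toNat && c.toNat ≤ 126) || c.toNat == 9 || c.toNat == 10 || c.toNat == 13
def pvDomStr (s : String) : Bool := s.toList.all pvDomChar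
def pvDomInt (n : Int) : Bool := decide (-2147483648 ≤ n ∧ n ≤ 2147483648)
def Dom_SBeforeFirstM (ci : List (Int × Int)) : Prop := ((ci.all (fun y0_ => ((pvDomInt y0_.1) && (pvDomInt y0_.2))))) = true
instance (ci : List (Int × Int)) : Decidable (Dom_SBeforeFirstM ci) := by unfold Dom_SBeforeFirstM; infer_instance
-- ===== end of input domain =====

-- B replaces A's find-index-then-rescan-the-prefix structure with one accumulating pass (objective: simpler).

-- ===== PORT A =====
-- inner loop of A: s = 0; for i in range(0, index): if ci[i][0] == 4: s += ci[i][1]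
def sbffSum (ci : List (Int × Int)) (index : Nat) : Int :=
  (List.range index).foldl
    (fun s i => let e := ci.getD i (0, 0); if e.1 == 4 then s + e.2 else s) 0

-- outer loop of A: for index in range(len(ci)): if ci[index][0] == 0 then return …
def sbffFind (ci : List (Int × Int)) (rest : List (Int × Int)) (index : Nat) : Option Int :=
  match rest with
  | [] => none
  | e :: rs =>
    if e.1 == 0 then
      if index == 0 then some 0 else some (sbffSum ci index)
    else sbffFind ci rs (index + 1)

def SBeforeFirstM (ci : List (Int × Int)) : Option Int := sbffFind ci ci 0

-- ===== PORT B =====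
def sbffAltGo (rest : List (Int × Int)) (s : Int) : Option Int :=
  match rest with
  | [] => none
  | el :: rs =>
    if el.1 == 0 then some s
    else if el.1 == 4 then sbffAltGo rs (s + el.2)
    else sbffAltGo rs s

def SBeforeFirstM_alt (ci : List (Int × Int)) : Option Int := sbffAltGo ci 0

-- ===== PRECONDITION & SPEC =====
def Spec_SBeforeFirstM (ci : List (Int × Int)) (out : Option Int) : Prop := out = SBeforeFirstM_alt ci
instance (ci : List (Int × Int)) (out : Option Int) : Decidable (Spec_SBeforeFirstM ci out) := by unfold Spec_SBeforeFirstM; infer_instance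

-- ===== CLAIM (what is proved, stated in full; the proofs are below) =====
def Claim_equal_SBeforeFirstM : Prop := ∀ (ci : List (Int × Int)), Dom_SBeforeFirstM ci → Spec_SBeforeFirstM ci (SBeforeFirstM ci)

-- ===== LEMMAS AND PROOFS =====

theorem sbffSum_zero (ci : List (Int × Int)) : sbffSum ci 0 = 0 := rfl

theorem sbffSum_succ (ci : List (Int × Int)) (index : Nat) :
    sbffSum ci (index + 1) =
      if (ci.getD index (0, 0)).1 == 4 then sbffSum ci index + (ci.getD index (0, 0)).2
      else sbffSum ci index := by
  simp only [sbffSum, List.range_succ, List.foldl_append, List.foldl_cons, List.foldl_nil]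

theorem sbffFind_eq_alt (ci rest : List (Int × Int)) (index : Nat)
    (h : ci.drop index = rest) :
    sbffFind ci rest index = sbffAltGo rest (sbffSum ci index) := by
  induction rest generalizing index with
  | nil => rfl
  | cons e rs ih =>
    have hget : ci.getD index (0, 0) = e := by
      have h0 : ci[index]? = some e := by
        have h2 : (List.drop index ci)[0]? = ci[index + 0]? := List.getElem?_drop
        rw [h] at h2
        simpa using h2.symm
      simp [List.getD, h0]
    have hrs : ci.drop (index + 1) = rs := by
      have := congrArg (List.drop 1) h
      simpa [List.drop_drop, Nat.add_comm] using this
    simp only [sbffFind, sbffAltGo]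
    by_cases h0 : e.1 == 0
    · rw [if_pos h0, if_pos h0]
      by_cases hz : index = 0
      · subst hz; rw [if_pos (by simp), sbffSum_zero]
      · rw [if_neg (by simpa using hz)]
    · rw [if_neg h0, if_neg h0, ih (index + 1) hrs, sbffSum_succ, hget]
      by_cases h4 : e.1 == 4
      · rw [if_pos h4, if_pos h4]
      · rw [if_neg h4, if_neg h4]

-- ===== VERDICT (by name: the statement is the Claim_ definition above) =====
theorem SBeforeFirstM_spec : Claim_equal_SBeforeFirstM := by
  intro ci _
  unfold Spec_SBeforeFirstM SBeforeFirstM SBeforeFirstM_alt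
  rw [sbffFind_eq_alt ci ci 0 rfl, sbffSum_zero]
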